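-- pv_equiv track=rewrite | github.com/matteomrz/visual-chunking | segmentation/methods/fixed_sized.py | _get_max_min_per_elem
-- ===== SOURCE A (Python) =====
-- def _get_max_min_per_elem(element_ids: list[tuple]):
--     """
--     Finds the lowest and highest token indices for each element.
--
--     Args:
--         element_ids: List of Tuples of the structure: (``element_id``, ``token_index``)
--
--     """
--     elem_min_max = {}
--
--     for elem_id, token_idx in element_ids:
--         min_idx, max_idx = elem_min_max.get(elem_id, (token_idx, token_idx))
--
--         if token_idx <= min_idx:
--             elem_min_max[elem_id] = (token_idx, max_idx)
--         if token_idx >= max_idx: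
--             elem_min_max[elem_id] = (min_idx, token_idx)
--
--     return elem_min_max
-- ===== SOURCE B (Python) =====
-- def _get_max_min_per_elem(element_ids: list[tuple]):
--     """Group token indices by element id, then take min/max per group."""
--     groups = {}
--     for elem_id, token_idx in element_ids:
--         groups.setdefault(elem_id, []).append(token_idx)
--     return {eid: (min(vals), max(vals)) for eid, vals in groups.items()}
-- ===== Notes on version B (the rewrite author's own statement) =====
-- stated objective: simpler
-- what changed: B first groups all token indices per element id in one dict-building pass and then computes each (min, max) by reduction over the group, instead of incrementally maintaining the running min/max with two conditional updates per element.
import Mathlib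
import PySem

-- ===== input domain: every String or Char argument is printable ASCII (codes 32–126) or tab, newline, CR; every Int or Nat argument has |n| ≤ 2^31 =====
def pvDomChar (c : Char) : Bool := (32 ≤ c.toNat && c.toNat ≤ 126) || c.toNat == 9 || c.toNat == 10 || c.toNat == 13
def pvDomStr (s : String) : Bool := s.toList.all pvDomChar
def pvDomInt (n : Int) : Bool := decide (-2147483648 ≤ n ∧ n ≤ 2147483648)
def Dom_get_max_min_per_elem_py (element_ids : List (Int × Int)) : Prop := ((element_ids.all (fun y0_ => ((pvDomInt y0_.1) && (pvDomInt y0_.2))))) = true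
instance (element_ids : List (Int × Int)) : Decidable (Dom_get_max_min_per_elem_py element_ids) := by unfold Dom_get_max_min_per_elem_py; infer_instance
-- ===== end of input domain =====

-- B groups token indices per element id first, then reduces each group with min/max: a simpler two-phase decomposition of A's incremental min/max maintenance (same cost).

-- ===== PORT A =====
-- A's loop: read (min,max) with default (tok,tok), then two conditional dict writes.
def get_max_min_per_elem_py (element_ids : List (Int × Int)) : List (Int × Int × Int) :=
  (element_ids.foldl (fun d p =>
      let mm := d.getD p.1 (p.2, p.2)
      let d1 := if p.2 ≤ mm.1 then d.insert p.1 (p.2, mm.2) else d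
      if p.2 ≥ mm.2 then d1.insert p.1 (mm.1, p.2) else d1)
    PySem.Dict.empty).items

-- ===== PORT B =====
-- B: one grouping pass, then min/max per group. Groups are never empty, so Python's
-- min(vals)/max(vals) never raise; the `.getD 0` default is unreachable.
def get_max_min_per_elem_py_alt (element_ids : List (Int × Int)) : List (Int × Int × Int) :=
  let groups := element_ids.foldl (fun d p => d.modify p.1 [] (· ++ [p.2])) PySem.Dict.empty
  groups.items.map (fun p =>
    (p.1, ((PySem.List.min? p.2 (fun y => y)).getD 0, (PySem.List.max? p.2 (fun y => y)).getD 0)))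

-- ===== PRECONDITION & SPEC =====
def Spec_get_max_min_per_elem_py (element_ids : List (Int × Int)) (out : List (Int × Int × Int)) : Prop := out = get_max_min_per_elem_py_alt element_ids
instance (element_ids : List (Int × Int)) (out : List (Int × Int × Int)) : Decidable (Spec_get_max_min_per_elem_py element_ids out) := by unfold Spec_get_max_min_per_elem_py; infer_instance

-- ===== CLAIM (what is proved, stated in full; the proofs are below) =====
def Claim_equal_get_max_min_per_elem_py : Prop := ∀ (element_ids : List (Int × Int)), Dom_get_max_min_per_elem_py element_ids → Spec_get_max_min_per_elem_py element_ids (get_max_min_per_elem_py element_ids)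

-- ===== LEMMAS AND PROOFS =====

-- the value abstraction: a nonempty group ↦ its (min, max)
def pvMnMx (vs : List Int) : Int × Int :=
  ((PySem.List.min? vs (fun y => y)).getD 0, (PySem.List.max? vs (fun y => y)).getD 0)

-- A's dict reconstructed from B's grouping dict
def pvG (d : PySem.Dict Int (List Int)) : PySem.Dict Int (Int × Int) :=
  PySem.Dict.mk (d.items.map (fun p => (p.1, pvMnMx p.2)))

-- A's loop body, named
def pvStepA (d : PySem.Dict Int (Int × Int)) (p : Int × Int) : PySem.Dict Int (Int × Int) :=
  let mm := d.getD p.1 (p.2, p.2)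
  let d1 := if p.2 ≤ mm.1 then d.insert p.1 (p.2, mm.2) else d
  if p.2 ≥ mm.2 then d1.insert p.1 (mm.1, p.2) else d1

lemma pvG_contains (d : PySem.Dict Int (List Int)) (k : Int) :
    (pvG d).contains k = d.contains k := by
  simp [pvG, PySem.Dict.contains, List.any_map, Function.comp_def]

lemma pvG_get? (d : PySem.Dict Int (List Int)) (k : Int) :
    (pvG d).get? k = (d.get? k).map pvMnMx := by
  simp [pvG, PySem.Dict.get?, List.find?_map, Function.comp_def, Option.map_map]

lemma pvG_keys (d : PySem.Dict Int (List Int)) : (pvG d).keys = d.keys := by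
  simp [pvG, PySem.Dict.keys, List.map_map, Function.comp]

lemma pv_map_id_of_not_mem {α : Type} (k : Int) (v : α) (l : List (Int × α))
    (h : k ∉ l.map Prod.fst) :
    l.map (fun p => if (p.1 == k) = true then (k, v) else p) = l := by
  induction l with
  | nil => rfl
  | cons a t ih =>
    have h1 : ¬ a.1 = k := fun hk => h (by simp [List.map_cons, hk])
    have h2 : k ∉ t.map Prod.fst := fun hm => h (by simp [List.map_cons, hm])
    rw [List.map_cons, if_neg (show ¬((a.1 == k) = true) by simp [h1]), ih h2]

lemma pv_map_id_of_mem {α : Type} (k : Int) (v : α) (l : List (Int × α))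
    (hnd : (l.map Prod.fst).Nodup) (hm : (k, v) ∈ l) :
    l.map (fun p => if (p.1 == k) = true then (k, v) else p) = l := by
  induction l with
  | nil => rfl
  | cons a t ih =>
    simp only [List.map_cons, List.nodup_cons] at hnd
    rcases List.mem_cons.mp hm with h | h
    · subst h
      have hhd : (if (((k, v) : Int × α).1 == k) = true then (k, v) else (k, v)) = (k, v) := by
        split <;> rfl
      simp only [List.map_cons, hhd, pv_map_id_of_not_mem k v t hnd.1]
    · have h1 : ¬ a.1 = k := by
        intro hk
        exact hnd.1 (hk ▸ (List.mem_map.mpr ⟨(k, v), h, rfl⟩))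
      rw [List.map_cons, if_neg (show ¬((a.1 == k) = true) by simp [h1]), ih hnd.2 h]

-- insert of the already-stored value is the identity
lemma pv_insert_self {α : Type} (d : PySem.Dict Int α) (k : Int) (v : α)
    (hnd : d.keys.Nodup) (hm : (k, v) ∈ d.items) : d.insert k v = d := by
  have hc : d.contains k = true := by
    unfold PySem.Dict.contains
    rw [List.any_eq_true]
    exact ⟨(k, v), hm, by simp⟩
  apply PySem.Dict.ext
  rw [PySem.Dict.items_insert_of_contains d v hc]
  exact pv_map_id_of_mem k v d.items hnd hm

lemma pvG_insert (d : PySem.Dict Int (List Int)) (k : Int) (vs : List Int) :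
    pvG (d.insert k vs) = (pvG d).insert k (pvMnMx vs) := by
  apply PySem.Dict.ext
  by_cases h : d.contains k = true
  · have h' : (pvG d).contains k = true := by rw [pvG_contains]; exact h
    rw [show (pvG (d.insert k vs)).items = (d.insert k vs).items.map (fun p => (p.1, pvMnMx p.2)) from rfl,
        PySem.Dict.items_insert_of_contains d vs h,
        PySem.Dict.items_insert_of_contains (pvG d) (pvMnMx vs) h']
    show _ = ((d.items.map (fun p => (p.1, pvMnMx p.2))).map _)
    simp only [List.map_map]
    apply List.map_congr_left
    intro p _
    by_cases hk : p.1 = k <;> simp [Function.comp, hk]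
  · have h' : ¬ (pvG d).contains k = true := by rw [pvG_contains]; exact h
    rw [show (pvG (d.insert k vs)).items = (d.insert k vs).items.map (fun p => (p.1, pvMnMx p.2)) from rfl,
        PySem.Dict.items_insert_of_not_contains d vs (by simpa using h),
        PySem.Dict.items_insert_of_not_contains (pvG d) (pvMnMx vs) (by simpa using h')]
    simp [pvG]

lemma pv_foldl_min_le (x : Int) (t : List Int) : t.foldl min x ≤ x := by
  induction t generalizing x with
  | nil => simp
  | cons y t ih => exact le_trans (ih (min x y)) (min_le_left x y)

lemma pv_le_foldl_max (x : Int) (t : List Int) : x ≤ t.foldl max x := by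
  induction t generalizing x with
  | nil => simp
  | cons y t ih => exact le_trans (le_max_left x y) (ih (max x y))

lemma pvMnMx_cons (x : Int) (t : List Int) :
    pvMnMx (x :: t) = (t.foldl min x, t.foldl max x) := by
  simp [pvMnMx, PySem.List.min?_id_cons, PySem.List.max?_id_cons]

-- the heart: one A-step on the abstraction = abstraction of one B-step
lemma pv_step (d : PySem.Dict Int (List Int)) (k t : Int)
    (hnd : d.keys.Nodup) (hne : ∀ p ∈ d.items, p.2 ≠ []) :
    pvStepA (pvG d) (k, t) = pvG (d.insert k (d.getD k [] ++ [t])) := by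
  rw [pvG_insert]
  by_cases h : d.contains k = true
  · obtain ⟨vs, hvs⟩ : ∃ vs, d.get? k = some vs := by
      rw [← Option.isSome_iff_exists, ← PySem.Dict.contains_eq_isSome_get?]; exact h
    have hmem : (k, vs) ∈ d.items := PySem.Dict.mem_items_of_get?_eq_some d hvs
    have hgd : d.getD k [] = vs := by simp [PySem.Dict.getD, hvs]
    obtain ⟨x, t', rfl⟩ : ∃ x t', vs = x :: t' := by
      cases vs with
      | nil => exact absurd rfl (hne _ hmem)
      | cons x t' => exact ⟨x, t', rfl⟩
    have hgG : (pvG d).getD k (t, t) = (t'.foldl min x, t'.foldl max x) := by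
      simp [PySem.Dict.getD, pvG_get?, hvs, pvMnMx_cons]
    have hle : t'.foldl min x ≤ t'.foldl max x :=
      le_trans (pv_foldl_min_le x t') (pv_le_foldl_max x t')
    have hres : pvMnMx (d.getD k [] ++ [t])
        = (min (t'.foldl min x) t, max (t'.foldl max x) t) := by
      rw [hgd]
      show pvMnMx (x :: (t' ++ [t])) = _
      rw [pvMnMx_cons]
      simp [List.foldl_append]
    rw [hres]
    unfold pvStepA
    simp only [hgG]
    by_cases h1 : t ≤ t'.foldl min x <;> by_cases h2 : t ≥ t'.foldl max x <;>
      simp only [h1, h2, if_pos, ite_false, PySem.Dict.insert_insert_self]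
    · simp at h1 h2
      rw [min_eq_left (by omega), max_eq_right (by omega)]
    · simp at h1 h2
      rw [min_eq_right (by omega), max_eq_left (by omega)]
    · simp at h1 h2
      rw [min_eq_left (by omega), max_eq_right (by omega)]
    · simp at h1 h2
      rw [min_eq_left (by omega), max_eq_left (by omega)]
      apply Eq.symm
      apply pv_insert_self _ _ _ (by rw [pvG_keys]; exact hnd)
      rw [← pvMnMx_cons]
      exact List.mem_map.mpr ⟨(k, x :: t'), hmem, rfl⟩
  · have hgd : d.getD k [] = [] := PySem.Dict.getD_of_not_contains d [] (by simpa using h)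
    have hgG : (pvG d).getD k (t, t) = (t, t) :=
      PySem.Dict.getD_of_not_contains (pvG d) (t, t) (by rw [pvG_contains]; simpa using h)
    rw [hgd]
    show pvStepA (pvG d) (k, t) = (pvG d).insert k (pvMnMx [t])
    unfold pvStepA
    simp only [hgG]
    have : pvMnMx [t] = (t, t) := by rw [show [t] = t :: ([] : List Int) from rfl, pvMnMx_cons]; simp
    simp [this, PySem.Dict.insert_insert_self]

lemma pv_loop (l : List (Int × Int)) :
    ∀ (d : PySem.Dict Int (List Int)), d.keys.Nodup → (∀ p ∈ d.items, p.2 ≠ []) →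
    l.foldl pvStepA (pvG d) = pvG (l.foldl (fun d p => d.modify p.1 [] (· ++ [p.2])) d) := by
  induction l with
  | nil => intro d _ _; rfl
  | cons q rest ih =>
    intro d hnd hne
    obtain ⟨k, t⟩ := q
    have hstep : pvStepA (pvG d) (k, t) = pvG (d.insert k (d.getD k [] ++ [t])) :=
      pv_step d k t hnd hne
    simp only [List.foldl_cons]
    rw [show PySem.Dict.modify d k [] (· ++ [t]) = d.insert k (d.getD k [] ++ [t]) from rfl,
        hstep]
    apply ih
    · exact PySem.Dict.nodup_keys_insert d k _ hnd
    · intro p hp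
      rcases (PySem.Dict.mem_items_insert d k _ p).mp hp with h | h
      · subst h; simp
      · exact hne p h.1

-- ===== VERDICT (by name: the statement is the Claim_ definition above) =====
theorem get_max_min_per_elem_py_spec : Claim_equal_get_max_min_per_elem_py := by
  intro element_ids _
  show get_max_min_per_elem_py element_ids = get_max_min_per_elem_py_alt element_ids
  unfold get_max_min_per_elem_py get_max_min_per_elem_py_alt
  have h0 : pvG PySem.Dict.empty = PySem.Dict.empty := rfl
  have := pv_loop element_ids PySem.Dict.empty (by simp [PySem.Dict.empty, PySem.Dict.keys])
    (by intro p hp; simp [PySem.Dict.empty] at hp)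
  rw [← h0, show (fun (d : PySem.Dict Int (Int × Int)) (p : Int × Int) =>
        let mm := d.getD p.1 (p.2, p.2)
        let d1 := if p.2 ≤ mm.1 then d.insert p.1 (p.2, mm.2) else d
        if p.2 ≥ mm.2 then d1.insert p.1 (mm.1, p.2) else d1) = pvStepA from rfl, this]
  rfl
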